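-- pv_equiv track=rewrite | github.com/uw-ictd/mwachx | utils/sms_utils.py | replace_vars
-- ===== SOURCE A (Python) =====
-- def replace_vars(msg):
--     if '<' in msg:
--         variables = [
--             ('<participant name>', '{name}'),
--             ('<nurse name>', '{nurse}'),
--             ('<clinic name>', '{clinic}'),
--         ]
--         for needle, string in variables:
--             msg = msg.replace(needle, string)
--     return msg
-- ===== SOURCE B (Python) =====
-- def replace_vars(msg):
--     tags = [('<participant name>', '{name}'),
--             ('<nurse name>', '{nurse}'),
--             ('<clinic name>', '{clinic}')]
--     parts = []
--     i = 0
--     while i < len(msg):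
--         for tag, token in tags:
--             if msg.startswith(tag, i):
--                 parts.append(token)
--                 i += len(tag)
--                 break
--         else:
--             parts.append(msg[i])
--             i += 1
--     return ''.join(parts)
-- ===== Notes on version B (the rewrite author's own statement) =====
-- stated objective: alternative
-- what changed: A runs three sequential whole-string str.replace passes; B makes a single left-to-right scan that matches any of the three tags at each position and emits the token or the character, joining the pieces at the end.
import Mathlib
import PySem

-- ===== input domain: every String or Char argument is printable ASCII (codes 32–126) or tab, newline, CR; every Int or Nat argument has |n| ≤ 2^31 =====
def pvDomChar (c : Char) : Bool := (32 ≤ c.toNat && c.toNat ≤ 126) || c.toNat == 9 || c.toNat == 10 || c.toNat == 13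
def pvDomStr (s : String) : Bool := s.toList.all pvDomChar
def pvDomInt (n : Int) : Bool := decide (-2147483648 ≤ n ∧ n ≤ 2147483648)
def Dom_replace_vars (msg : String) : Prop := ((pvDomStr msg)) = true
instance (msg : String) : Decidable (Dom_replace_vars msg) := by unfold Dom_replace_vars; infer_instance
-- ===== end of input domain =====

-- B replaces A's three sequential whole-string replace passes by a single left-to-right scan with a tag table; objective: alternative (one pass instead of three).


-- ===== PORT A =====
-- literal port: guard 'if "<" in msg', then the three msg.replace passes in order
def replace_vars (msg : String) : String :=
  if PySem.Str.isIn "<" msg then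
    let msg1 := PySem.Str.replace msg "<participant name>" "{name}"
    let msg2 := PySem.Str.replace msg1 "<nurse name>" "{nurse}"
    let msg3 := PySem.Str.replace msg2 "<clinic name>" "{clinic}"
    msg3
  else msg

-- ===== PORT B =====
-- port of Source B's single while-loop scan: at each position try the three tags in order
-- (msg.startswith(tag, i) → isPrefixOf on the current suffix), else copy one char.
def scanB : List Char → List Char
  | [] => []
  | c :: t =>
    if "<participant name>".toList.isPrefixOf (c :: t) then
      "{name}".toList ++ scanB (t.drop 17)
    else if "<nurse name>".toList.isPrefixOf (c :: t) then
      "{nurse}".toList ++ scanB (t.drop 11)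
    else if "<clinic name>".toList.isPrefixOf (c :: t) then
      "{clinic}".toList ++ scanB (t.drop 12)
    else c :: scanB t
termination_by l => l.length
decreasing_by all_goals (simp [List.length_drop]; try omega)

def replace_vars_alt (msg : String) : String := String.ofList (scanB msg.toList)

-- ===== PRECONDITION & SPEC =====
def Spec_replace_vars (msg : String) (out : String) : Prop := out = replace_vars_alt msg
instance (msg : String) (out : String) : Decidable (Spec_replace_vars msg out) := by unfold Spec_replace_vars; infer_instance

-- ===== CLAIM (what is proved, stated in full; the proofs are below) =====
def Claim_equal_replace_vars : Prop := ∀ (msg : String), Dom_replace_vars msg → Spec_replace_vars msg (replace_vars msg)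

-- ===== LEMMAS AND PROOFS =====

-- structural characterisation of one leftmost-nonoverlapping replace pass (old = o :: os nonempty)
def rep (o : Char) (os new : List Char) : List Char → List Char
  | [] => []
  | c :: t =>
    if (o :: os).isPrefixOf (c :: t) then new ++ rep o os new (t.drop os.length)
    else c :: rep o os new t
termination_by l => l.length
decreasing_by all_goals (simp [List.length_drop]; try omega)

theorem rep_nil (o : Char) (os new : List Char) : rep o os new [] = [] := by rw [rep]

theorem rep_cons (o : Char) (os new : List Char) (c : Char) (t : List Char) :
    rep o os new (c :: t) =
      if (o :: os).isPrefixOf (c :: t) then new ++ rep o os new (t.drop os.length)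
      else c :: rep o os new t := by
  rw [rep]

theorem rep_go (o : Char) (os new : List Char) :
    ∀ (fuel : Nat) (l acc : List Char), l.length ≤ fuel →
      PySem.Chars.replace.go (o :: os) new fuel l acc = acc.reverse ++ rep o os new l := by
  intro fuel
  induction fuel with
  | zero =>
    intro l acc h
    have : l = [] := List.length_eq_zero_iff.mp (Nat.le_zero.mp h)
    subst this
    simp [PySem.Chars.replace.go, rep_nil]
  | succ n ih =>
    intro l acc h
    cases l with
    | nil => simp [PySem.Chars.replace.go, rep_nil]
    | cons c t =>
      rw [rep_cons]
      by_cases hp : (o :: os).isPrefixOf (c :: t)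
      · simp only [PySem.Chars.replace.go, hp, if_true]
        have hlen : (List.drop (o :: os).length (c :: t)).length ≤ n := by
          simp only [List.length_drop, List.length_cons] at *
          omega
        rw [ih _ _ hlen]
        simp [List.drop]
      · simp only [PySem.Chars.replace.go, hp, if_false]
        have hlen : t.length ≤ n := by simp at h; omega
        rw [ih _ _ hlen]
        simp

theorem replace_eq (o : Char) (os new s : List Char) :
    PySem.Chars.replace s (o :: os) new = rep o os new s := by
  simp only [PySem.Chars.replace, List.isEmpty_cons, Bool.false_eq_true, if_false]
  exact rep_go o os new s.length s [] (le_refl _)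

theorem rep_append (o : Char) (os new : List Char) :
    ∀ (a b : List Char), o ∉ a → rep o os new (a ++ b) = a ++ rep o os new b := by
  intro a
  induction a with
  | nil => intro b _; simp
  | cons c a' ih =>
    intro b hmem
    have hc : o ≠ c := fun h => hmem (h ▸ List.mem_cons_self ..)
    rw [List.cons_append, rep_cons]
    have hp : (o :: os).isPrefixOf (c :: (a' ++ b)) = false := by
      simp [List.isPrefixOf, hc]
    rw [hp]
    simp only [Bool.false_eq_true, if_false, List.cons_append]
    rw [ih b (fun h => hmem (List.mem_cons_of_mem _ h))]

-- a pattern free of both the tag head and the token head cannot be created as a prefix by a replace pass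
theorem rep_pull (o : Char) (os : List Char) (p : Char) (nr : List Char) :
    ∀ (b u : List Char), o ∉ b → p ∉ b → b <+: rep o os (p :: nr) u → b <+: u := by
  intro b
  induction b with
  | nil => intro u _ _ _; exact List.nil_prefix
  | cons x b' ih =>
    intro u ho hp hpre
    cases u with
    | nil =>
      rw [rep_nil] at hpre
      exact absurd (List.eq_nil_of_prefix_nil hpre) (by simp)
    | cons d u' =>
      rw [rep_cons] at hpre
      by_cases hm : (o :: os).isPrefixOf (d :: u')
      · rw [if_pos hm] at hpre
        rw [List.cons_append, List.cons_prefix_cons] at hpre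
        exact absurd hpre.1 (fun h => hp (h ▸ List.mem_cons_self ..))
      · rw [if_neg hm] at hpre
        rw [List.cons_prefix_cons] at hpre ⊢
        exact ⟨hpre.1, ih u' (fun h => ho (List.mem_cons_of_mem _ h))
          (fun h => hp (List.mem_cons_of_mem _ h)) hpre.2⟩

theorem scanB_nil : scanB [] = [] := by rw [scanB]

theorem scanB_cons (c : Char) (t : List Char) :
    scanB (c :: t) =
      if "<participant name>".toList.isPrefixOf (c :: t) then
        "{name}".toList ++ scanB (t.drop 17)
      else if "<nurse name>".toList.isPrefixOf (c :: t) then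
        "{nurse}".toList ++ scanB (t.drop 11)
      else if "<clinic name>".toList.isPrefixOf (c :: t) then
        "{clinic}".toList ++ scanB (t.drop 12)
      else c :: scanB t := by
  rw [scanB]

-- tag bodies / tokens
def B1 : List Char := "participant name>".toList
def B2 : List Char := "nurse name>".toList
def B3 : List Char := "clinic name>".toList
def N1 : List Char := "{name}".toList
def N2 : List Char := "{nurse}".toList
def N3 : List Char := "{clinic}".toList

theorem T1_eq : "<participant name>".toList = '<' :: B1 := by decide
theorem T2_eq : "<nurse name>".toList = '<' :: B2 := by decide
theorem T3_eq : "<clinic name>".toList = '<' :: B3 := by decide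

theorem main_eq : ∀ (n : Nat) (s : List Char), s.length ≤ n →
    rep '<' B3 N3 (rep '<' B2 N2 (rep '<' B1 N1 s)) = scanB s := by
  intro n
  induction n with
  | zero =>
    intro s h
    have : s = [] := List.length_eq_zero_iff.mp (Nat.le_zero.mp h)
    subst this
    simp [rep_nil, scanB_nil]
  | succ n ih =>
    intro s h
    cases s with
    | nil => simp [rep_nil, scanB_nil]
    | cons c t =>
      rw [scanB_cons, T1_eq, T2_eq, T3_eq]
      by_cases h1 : ('<' :: B1).isPrefixOf (c :: t)
      · -- participant tag matches here
        rw [if_pos h1]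
        rw [rep_cons, if_pos h1]
        have hB1 : B1.length = 17 := by decide
        rw [rep_append '<' B2 N2 N1 _ (by decide), rep_append '<' B3 N3 N1 _ (by decide)]
        have hlen : (t.drop B1.length).length ≤ n := by
          simp only [List.length_drop]; simp at h; omega
        rw [ih _ hlen, hB1]
        rfl
      · rw [if_neg h1]
        by_cases h2 : ('<' :: B2).isPrefixOf (c :: t)
        · -- nurse tag matches here
          rw [if_pos h2]
          obtain ⟨hc, hb2⟩ := List.cons_prefix_cons.mp (List.isPrefixOf_iff_prefix.mp h2)
          subst hc
          obtain ⟨t', rfl⟩ := hb2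
          rw [rep_cons, if_neg h1]
          rw [rep_append '<' B1 N1 B2 _ (by decide)]
          rw [rep_cons]
          have hpos : ('<' :: B2).isPrefixOf ('<' :: (B2 ++ rep '<' B1 N1 t')) = true := by
            simp [List.isPrefixOf_iff_prefix, List.cons_prefix_cons, List.prefix_append]
          rw [if_pos hpos]
          rw [List.drop_left' rfl]
          rw [rep_append '<' B3 N3 N2 _ (by decide)]
          have hlen : t'.length ≤ n := by
            simp [List.length_append] at h
            have : B2.length = 11 := by decide
            omega
          rw [ih _ hlen]
          have hd : (B2 ++ t').drop 11 = t' := by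
            have : B2.length = 11 := by decide
            rw [← this, List.drop_left]
          rw [hd]
          rfl
        · rw [if_neg h2]
          by_cases h3 : ('<' :: B3).isPrefixOf (c :: t)
          · -- clinic tag matches here
            rw [if_pos h3]
            obtain ⟨hc, hb3⟩ := List.cons_prefix_cons.mp (List.isPrefixOf_iff_prefix.mp h3)
            subst hc
            obtain ⟨t', rfl⟩ := hb3
            rw [rep_cons, if_neg h1]
            rw [rep_append '<' B1 N1 B3 _ (by decide)]
            rw [rep_cons]
            have hneg : ('<' :: B2).isPrefixOf ('<' :: (B3 ++ rep '<' B1 N1 t')) = false := by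
              simp only [List.isPrefixOf, beq_iff_eq]
              have : B2.isPrefixOf (B3 ++ rep '<' B1 N1 t') = false := by
                show ('n' :: "urse name>".toList).isPrefixOf
                  (('c' :: "linic name>".toList) ++ rep '<' B1 N1 t') = false
                simp [List.isPrefixOf]
              simp [this]
            rw [hneg]
            simp only [Bool.false_eq_true, if_false]
            rw [rep_append '<' B2 N2 B3 _ (by decide)]
            rw [rep_cons]
            have hpos : ('<' :: B3).isPrefixOf ('<' :: (B3 ++ rep '<' B2 N2 (rep '<' B1 N1 t'))) = true := by
              simp [List.isPrefixOf_iff_prefix, List.cons_prefix_cons, List.prefix_append]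
            rw [if_pos hpos]
            rw [List.drop_left' rfl]
            have hlen : t'.length ≤ n := by
              simp [List.length_append] at h
              have : B3.length = 12 := by decide
              omega
            rw [ih _ hlen]
            have hd : (B3 ++ t').drop 12 = t' := by
              have : B3.length = 12 := by decide
              rw [← this, List.drop_left]
            rw [hd]
            rfl
          · -- no tag matches here
            rw [if_neg h3]
            rw [rep_cons, if_neg h1]
            have hN1 : N1 = '{' :: "name}".toList := by decide
            have hN2 : N2 = '{' :: "nurse}".toList := by decide
            have hneg2 : ('<' :: B2).isPrefixOf (c :: rep '<' B1 N1 t) = false := by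
              by_contra hcon
              have hcon' := Bool.of_not_eq_false hcon
              obtain ⟨hc, hb⟩ := List.cons_prefix_cons.mp (List.isPrefixOf_iff_prefix.mp hcon')
              subst hc
              have hpull : B2 <+: t := by
                refine rep_pull '<' B1 '{' "name}".toList B2 t (by decide) (by decide) ?_
                rw [← hN1]
                exact hb
              exact h2 (List.isPrefixOf_iff_prefix.mpr (List.cons_prefix_cons.mpr ⟨rfl, hpull⟩))
            rw [rep_cons, hneg2]
            simp only [Bool.false_eq_true, if_false]
            have hneg3 : ('<' :: B3).isPrefixOf (c :: rep '<' B2 N2 (rep '<' B1 N1 t)) = false := by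
              by_contra hcon
              have hcon' := Bool.of_not_eq_false hcon
              obtain ⟨hc, hb⟩ := List.cons_prefix_cons.mp (List.isPrefixOf_iff_prefix.mp hcon')
              subst hc
              have hpull1 : B3 <+: rep '<' B1 N1 t := by
                refine rep_pull '<' B2 '{' "nurse}".toList B3 _ (by decide) (by decide) ?_
                rw [← hN2]
                exact hb
              have hpull2 : B3 <+: t :=
                rep_pull '<' B1 '{' "name}".toList B3 t (by decide) (by decide) (hN1 ▸ hpull1)
              exact h3 (List.isPrefixOf_iff_prefix.mpr (List.cons_prefix_cons.mpr ⟨rfl, hpull2⟩))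
            rw [rep_cons, hneg3]
            simp only [Bool.false_eq_true, if_false]
            have hlen : t.length ≤ n := by simp at h; omega
            rw [ih _ hlen]

theorem scanB_id : ∀ (s : List Char), '<' ∉ s → scanB s = s := by
  intro s
  induction s with
  | nil => intro _; exact scanB_nil
  | cons c t ih =>
    intro hmem
    have hc : c ≠ '<' := fun h => hmem (h ▸ List.mem_cons_self ..)
    rw [scanB_cons, T1_eq, T2_eq, T3_eq]
    have h1 : ('<' :: B1).isPrefixOf (c :: t) = false := by
      simp [List.isPrefixOf, beq_iff_eq]; intro h; exact absurd h.symm hc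
    have h2 : ('<' :: B2).isPrefixOf (c :: t) = false := by
      simp [List.isPrefixOf, beq_iff_eq]; intro h; exact absurd h.symm hc
    have h3 : ('<' :: B3).isPrefixOf (c :: t) = false := by
      simp [List.isPrefixOf, beq_iff_eq]; intro h; exact absurd h.symm hc
    rw [h1, h2, h3]
    simp only [Bool.false_eq_true, if_false]
    rw [ih (fun h => hmem (List.mem_cons_of_mem _ h))]

-- ===== VERDICT (by name: the statement is the Claim_ definition above) =====
theorem replace_vars_spec : Claim_equal_replace_vars := by
  intro msg _
  unfold Spec_replace_vars replace_vars replace_vars_alt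
  by_cases hin : PySem.Str.isIn "<" msg
  · rw [if_pos hin]
    simp only [PySem.Str.replace, String.toList_ofList]
    rw [show "<participant name>".toList = '<' :: B1 from T1_eq,
        show "<nurse name>".toList = '<' :: B2 from T2_eq,
        show "<clinic name>".toList = '<' :: B3 from T3_eq]
    rw [replace_eq, replace_eq, replace_eq]
    rw [show "{name}".toList = N1 from rfl, show "{nurse}".toList = N2 from rfl,
        show "{clinic}".toList = N3 from rfl]
    rw [main_eq msg.toList.length msg.toList (le_refl _)]
  · rw [if_neg hin]
    have hmem : '<' ∉ msg.toList := by
      intro hm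
      apply hin
      rw [PySem.Str.isIn_iff_infix]
      obtain ⟨a, b, heq⟩ := List.append_of_mem hm
      rw [heq]
      exact ⟨a, b, by simp⟩
    rw [scanB_id msg.toList hmem]
    exact String.ofList_toList.symm
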